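-- pv_equiv track=rewrite | github.com/fsimkovic/riopy | riopy/misc.py | count_res_in_frag
-- ===== SOURCE A (Python) =====
-- def count_res_in_frag(residues, min_frag_len=3):
--     """Count the number of fragments in a list
--
--     Parameters
--     ----------
--     residues : list
--        A list of residue indexes
--     min_frag_len : int
--        The minimum length in residues of a fragment [default: 3]
--
--     Returns
--     -------
--     int
--        The number of fragments
--
--     """
--     if len(residues) < 1:
--         return 0
--
--     def valid_frag_len(c):
--         return c >= min_frag_len
--
--     res_count = 0
--     frag_len = 1
--
--     previous = residues[0]
--     for current in residues[1:]:
--         if current - 1 == previous: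
--             frag_len += 1
--         else:
--             if valid_frag_len(frag_len):
--                 res_count += frag_len
--             frag_len = 1
--         previous = current
--
--     if valid_frag_len(frag_len):
--         res_count += frag_len
--
--     return res_count
-- ===== SOURCE B (Python) =====
-- def count_res_in_frag(residues, min_frag_len=3):
--     # Staged decomposition: materialize the break positions, form boundary
--     # indices, then sum boundary differences that meet the threshold.
--     n = len(residues)
--     breaks = [i for i, (p, c) in enumerate(zip(residues, residues[1:]), 1)
--               if c - p != 1]
--     bounds = [0] + breaks + [n]
--     return sum(b - a for a, b in zip(bounds, bounds[1:]) if b - a >= min_frag_len)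
-- ===== Notes on version B (the rewrite author's own statement) =====
-- stated objective: alternative
-- what changed: Instead of A's single pass with a running fragment-length counter, B materializes the break positions between non-consecutive neighbours, builds a boundary-index list (zero, the breaks, then the length), and sums the boundary differences that meet the threshold; run lengths are derived from index arithmetic, never counted.
import Mathlib
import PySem

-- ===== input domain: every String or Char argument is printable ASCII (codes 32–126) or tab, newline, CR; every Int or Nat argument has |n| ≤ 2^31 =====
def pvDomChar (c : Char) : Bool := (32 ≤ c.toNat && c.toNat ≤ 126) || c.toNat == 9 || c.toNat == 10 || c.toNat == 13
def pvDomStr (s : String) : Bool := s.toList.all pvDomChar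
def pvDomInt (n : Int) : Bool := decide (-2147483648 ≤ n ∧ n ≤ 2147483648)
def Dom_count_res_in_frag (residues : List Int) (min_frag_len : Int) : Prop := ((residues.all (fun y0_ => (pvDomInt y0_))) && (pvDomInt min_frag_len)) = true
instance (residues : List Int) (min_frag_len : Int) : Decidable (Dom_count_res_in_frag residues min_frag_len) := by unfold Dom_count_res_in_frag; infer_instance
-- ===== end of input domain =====

-- B replaces A's running-counter loop with staged passes: it materializes the break positions, forms boundary indices, and sums boundary differences meeting the threshold (alternative decomposition, same cost).


-- ===== PORT A =====
-- literal port: state (res_count, frag_len, previous) folded over residues[1:]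
def count_res_in_frag (residues : List Int) (min_frag_len : Int) : Int :=
  match residues with
  | [] => 0
  | r0 :: rest =>
    let s := rest.foldl
      (fun (s : Int × Int × Int) current =>
        if current - 1 = s.2.2 then (s.1, s.2.1 + 1, current)
        else ((if min_frag_len ≤ s.2.1 then s.1 + s.2.1 else s.1), 1, current))
      (0, 1, r0)
    if min_frag_len ≤ s.2.1 then s.1 + s.2.1 else s.1

-- ===== PORT B =====
-- breaks = [i for i, (p, c) in enumerate(zip(residues, residues[1:]), 1) if c - p != 1]
-- bounds = [0] + breaks + [n]; sum(b - a for a, b in zip(bounds, bounds[1:]) if b - a >= min_frag_len)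
def count_res_in_frag_alt (residues : List Int) (min_frag_len : Int) : Int :=
  let n : Int := residues.length
  let breaks :=
    ((PySem.List.enumerate (residues.zip (PySem.List.slice residues (some 1) none)) 1).filter
      (fun t => decide (t.2.2 - t.2.1 ≠ 1))).map (fun t => t.1)
  let bounds := 0 :: (breaks ++ [n])
  (((bounds.zip (PySem.List.slice bounds (some 1) none)).filter
      (fun t => decide (min_frag_len ≤ t.2 - t.1))).map (fun t => t.2 - t.1)).sum

-- ===== PRECONDITION & SPEC =====
def Spec_count_res_in_frag (residues : List Int) (min_frag_len : Int) (out : Int) : Prop := out = count_res_in_frag_alt residues min_frag_len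
instance (residues : List Int) (min_frag_len : Int) (out : Int) : Decidable (Spec_count_res_in_frag residues min_frag_len out) := by unfold Spec_count_res_in_frag; infer_instance

-- ===== CLAIM (what is proved, stated in full; the proofs are below) =====
def Claim_equal_count_res_in_frag : Prop := ∀ (residues : List Int) (min_frag_len : Int), Dom_count_res_in_frag residues min_frag_len → Spec_count_res_in_frag residues min_frag_len (count_res_in_frag residues min_frag_len)

-- ===== LEMMAS AND PROOFS =====

-- the break indices of prev :: l, indexing the tail from i
def pvBreaks (i prev : Int) : List Int → List Int
  | [] => []
  | c :: t => if c - 1 = prev then pvBreaks (i + 1) c t else i :: pvBreaks (i + 1) c t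

theorem pvBreaks_eq : ∀ (l : List Int) (prev i : Int),
    ((PySem.List.enumerate ((prev :: l).zip l) i).filter
      (fun t => decide (t.2.2 - t.2.1 ≠ 1))).map (fun t => t.1) = pvBreaks i prev l := by
  intro l
  induction l with
  | nil => intro prev i; simp [PySem.List.enumerate_nil, pvBreaks]
  | cons c t ih =>
    intro prev i
    simp only [List.zip_cons_cons, PySem.List.enumerate_cons, List.filter_cons,
      decide_eq_true_eq]
    by_cases h : c - 1 = prev
    · have hc : ¬ (c - prev ≠ 1) := by omega
      rw [if_neg hc]
      simp only [pvBreaks, if_pos h, ih]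
    · have hc : (c - prev ≠ 1) := by omega
      rw [if_pos hc]
      simp only [List.map_cons, pvBreaks, if_neg h, ih]

-- sum of the filtered consecutive differences of a :: bs ++ [n]
def pvDS (m a : Int) (bs : List Int) (n : Int) : Int :=
  match bs with
  | [] => if m ≤ n - a then n - a else 0
  | b :: t => (if m ≤ b - a then b - a else 0) + pvDS m b t n

-- adjacent pairs of a list (zip with its own tail)
def pvPairs : List Int → List (Int × Int)
  | a :: b :: t => (a, b) :: pvPairs (b :: t)
  | _ => []

theorem pvZip_tail : ∀ (l : List Int), l.zip l.tail = pvPairs l := by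
  intro l
  induction l with
  | nil => simp [pvPairs]
  | cons a t ih =>
    cases t with
    | nil => simp [pvPairs]
    | cons b t' =>
      simp only [List.tail_cons, List.zip_cons_cons, pvPairs]
      rw [← ih, List.tail_cons]

theorem pvPairsSum : ∀ (bs : List Int) (m a n : Int),
    (((pvPairs (a :: (bs ++ [n]))).filter (fun t => decide (m ≤ t.2 - t.1))).map
      (fun t => t.2 - t.1)).sum = pvDS m a bs n := by
  intro bs
  induction bs with
  | nil =>
    intro m a n
    by_cases h : m ≤ n - a <;> simp [pvPairs, pvDS, h]
  | cons b t ih =>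
    intro m a n
    simp only [List.cons_append, pvPairs, List.filter_cons, decide_eq_true_eq]
    by_cases h : m ≤ b - a
    · rw [if_pos h, List.map_cons, List.sum_cons, ih m b n]
      simp only [pvDS, if_pos h]
    · rw [if_neg h, ih m b n]
      simp only [pvDS, if_neg h]
      omega

-- A's loop as a structural recursion
def pvA (m : Int) : List Int → Int → Int → Int
  | [], fl, _ => if m ≤ fl then fl else 0
  | c :: t, fl, prev =>
    if c - 1 = prev then pvA m t (fl + 1) c
    else (if m ≤ fl then fl else 0) + pvA m t 1 c

theorem pvFold_eq : ∀ (m : Int) (l : List Int) (rc fl prev : Int),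
    (if m ≤ (l.foldl
      (fun (s : Int × Int × Int) current =>
        if current - 1 = s.2.2 then (s.1, s.2.1 + 1, current)
        else ((if m ≤ s.2.1 then s.1 + s.2.1 else s.1), 1, current))
      (rc, fl, prev)).2.1
     then (l.foldl
      (fun (s : Int × Int × Int) current =>
        if current - 1 = s.2.2 then (s.1, s.2.1 + 1, current)
        else ((if m ≤ s.2.1 then s.1 + s.2.1 else s.1), 1, current))
      (rc, fl, prev)).1 + (l.foldl
      (fun (s : Int × Int × Int) current =>
        if current - 1 = s.2.2 then (s.1, s.2.1 + 1, current)
        else ((if m ≤ s.2.1 then s.1 + s.2.1 else s.1), 1, current))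
      (rc, fl, prev)).2.1
     else (l.foldl
      (fun (s : Int × Int × Int) current =>
        if current - 1 = s.2.2 then (s.1, s.2.1 + 1, current)
        else ((if m ≤ s.2.1 then s.1 + s.2.1 else s.1), 1, current))
      (rc, fl, prev)).1) = rc + pvA m l fl prev := by
  intro m l
  induction l with
  | nil => intro rc fl prev; simp [pvA]; split <;> omega
  | cons c t ih =>
    intro rc fl prev
    by_cases h : c - 1 = prev
    · simp only [List.foldl_cons, if_pos h, pvA]
      exact ih rc (fl + 1) c
    · simp only [List.foldl_cons, if_neg h, pvA]
      rw [ih]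
      split <;> omega

-- the boundary-difference sum over the break indices equals A's loop
theorem pvDS_pvA : ∀ (m : Int) (l : List Int) (a i fl prev : Int), a + fl = i →
    pvDS m a (pvBreaks i prev l) (i + l.length) = pvA m l fl prev := by
  intro m l
  induction l with
  | nil =>
    intro a i fl prev hai
    simp only [pvBreaks, pvDS, List.length_nil, pvA]
    have h1 : (i + ((0 : Nat) : Int)) - a = fl := by omega
    rw [h1]
  | cons c t ih =>
    intro a i fl prev hai
    have hlen : i + ((c :: t).length : Int) = (i + 1) + (t.length : Int) := by
      simp only [List.length_cons]
      push_cast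
      omega
    by_cases h : c - 1 = prev
    · simp only [pvBreaks, if_pos h, pvA, hlen]
      exact ih a (i + 1) (fl + 1) c (by omega)
    · simp only [pvBreaks, if_neg h, pvA, pvDS, hlen]
      have h2 : i - a = fl := by omega
      rw [h2, ih i (i + 1) 1 c (by omega)]

-- ===== VERDICT (by name: the statement is the Claim_ definition above) =====
theorem count_res_in_frag_spec : Claim_equal_count_res_in_frag := by
  intro residues m _
  show count_res_in_frag residues m = count_res_in_frag_alt residues m
  cases residues with
  | nil =>
    simp only [count_res_in_frag, count_res_in_frag_alt, PySem.List.slice_from_one,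
      List.length_nil]
    rw [pvZip_tail]
    by_cases h : m ≤ (0 : Int) <;>
      simp [pvPairs, PySem.List.enumerate_nil, h]
  | cons r0 rest =>
    simp only [count_res_in_frag, count_res_in_frag_alt, PySem.List.slice_from_one]
    rw [pvZip_tail]
    simp only [List.tail_cons]
    rw [pvBreaks_eq]
    have hn : (((r0 :: rest).length : Nat) : Int) = 1 + (rest.length : Int) := by
      simp only [List.length_cons]
      push_cast
      omega
    rw [hn, pvPairsSum (pvBreaks 1 r0 rest) m 0 (1 + (rest.length : Int))]
    rw [pvDS_pvA m rest 0 1 1 r0 (by omega), pvFold_eq m rest 0 1 r0, Int.zero_add]
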